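-- pv_equiv track=rewrite | github.com/pupssman/swamp-lights | mpy32-utils/test_trap.py | make_wave_loop
-- ===== SOURCE A (Python) =====
-- num_bulbs = 19
--
-- def make_wave_loop(width=2, interval=3):
--     # starting from 1, duh :(
--     blocks = [
--         (3,),
--         (4, 10),
--         (5, 9),
--         (6, 8),
--         (7,),
--         (11, 17),
--         (12, 16),
--         (13, 15),
--         (14,)
--     ]
--
--     starts, ends = (0, 1), (17, 18)
--
--     # start with all red
--     background = ['r'] * num_bulbs
--
--     # starts and ends are blue
--     for i in starts:
--         background[i] = 'b'
--     for i in ends: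
--         background[i] = 'b'
--
--     mask = []
--
--     # mask is the color seq of blocks
--     while len(mask) < len(blocks):
--         mask.append('b' * width)  # up of the wave -- blue -- you can pass
--         mask.append('r' * interval)  # down of the wave -- red -- you can not
--
--     mask = ''.join(mask)
--
--     result = []
--     for n in range(width + interval):  # max phases -- sum of widht + period
--         # n is the phase
--         result.append(list(background))
--
--         # push relevant color for matching block
--         for bis, c in zip(blocks, mask):
--             for bi in bis:
--                 result[-1][bi - 1] = c
--
--         # rotate mask once to the right, propagate the wave
--         mask = mask[-1:] + mask[:-1]
--
--     return [''.join(loop) for loop in result]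
-- ===== SOURCE B (Python) =====
-- def make_wave_loop(width=2, interval=3):
--     blocks = [
--         (3,),
--         (4, 10),
--         (5, 9),
--         (6, 8),
--         (7,),
--         (11, 17),
--         (12, 16),
--         (13, 15),
--         (14,)
--     ]
--
--     period = width + interval
--
--     background = ['r'] * 19
--     for i in (0, 1, 17, 18):
--         background[i] = 'b'
--
--     # one direct formula per block and phase; no mask string is built or rotated
--     out = []
--     for n in range(period):
--         row = list(background)
--         for i, bis in enumerate(blocks):
--             c = 'b' if (i - n) % period < width else 'r'
--             for bi in bis:
--                 row[bi - 1] = c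
--         out.append(''.join(row))
--     return out
-- ===== Notes on version B (the rewrite author's own statement) =====
-- stated objective: faster
-- what changed: Replaces the mask string (built by a while-loop and rotated one step per phase) with a direct modular formula per block: block i at phase n is blue iff (i-n) % (width+interval) < width; no mask is ever constructed or rotated.
-- intended difference: On (width,interval)=(1,0) A's mask loop counts the empty 'r'*0 entries toward the 9 it needs and stops with a 5-char mask, so blocks 6-9 (bulbs 11-17) are left red, returning ['bbbbbbbbbbrrrrrrrbb']; B colours every block by the formula and returns the intended all-blue row ['bbbbbbbbbbbbbbbbbbb'], which is what a width-1 wave with no gap means. — e.g. on make_wave_loop(1, 0): A returns ["bbbbbbbbbbrrrrrrrbb"], B returns ["bbbbbbbbbbbbbbbbbbb"]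
import Mathlib
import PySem

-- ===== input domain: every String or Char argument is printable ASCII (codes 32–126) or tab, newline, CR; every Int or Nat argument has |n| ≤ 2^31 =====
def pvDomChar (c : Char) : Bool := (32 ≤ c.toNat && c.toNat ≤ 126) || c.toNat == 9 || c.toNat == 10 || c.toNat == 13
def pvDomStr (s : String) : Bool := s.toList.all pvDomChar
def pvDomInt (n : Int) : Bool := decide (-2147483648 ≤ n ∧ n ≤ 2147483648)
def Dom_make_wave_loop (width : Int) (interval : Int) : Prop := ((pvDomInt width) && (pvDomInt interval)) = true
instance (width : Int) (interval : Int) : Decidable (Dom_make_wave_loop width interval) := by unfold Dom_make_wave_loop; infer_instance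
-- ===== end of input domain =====

-- B replaces A's built-and-rotated mask string with a per-block modular colour formula
-- (measured faster: no 5p-char mask is copied per phase); on (1,0) A's too-short mask leaves bulbs 11-17 red while B
-- returns the all-blue row — stated as the intended difference D_ below.


-- the literal `blocks` table both sources contain verbatim
def pyBlocks : List (List Int) := [[3],[4,10],[5,9],[6,8],[7],[11,17],[12,16],[13,15],[14]]

-- Python 'row[i] = c'; exact for 0 ≤ i < len row (every write in both programs uses a literal
-- in-range index: 0,1,17,18 and bi-1 ∈ [2,16] into a 19-element row)
def pySetAt (l : List Char) (i : Int) (c : Char) : List Char := l.set i.toNat c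

-- ===== PORT A =====
def bgA : List Char :=
  let b1 := [(0:Int), 1].foldl (fun acc i => pySetAt acc i 'b') (List.replicate 19 'r')
  [(17:Int), 18].foldl (fun acc i => pySetAt acc i 'b') b1

-- the while loop; 'b'*width is List.replicate width.toNat 'b' (Python clamps a negative count to 0)
def buildMaskA (width interval : Int) (mask : List (List Char)) : List (List Char) :=
  if mask.length < 9 then
    buildMaskA width interval
      (mask ++ [List.replicate width.toNat 'b', List.replicate interval.toNat 'r'])
  else mask
termination_by 9 - mask.length
decreasing_by simp; omega

def applyBlockA (row : List Char) (bis : List Int) (c : Char) : List Char :=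
  bis.foldl (fun r bi => pySetAt r (bi - 1) c) row

def stepRowA (mask : List Char) : List Char :=
  (pyBlocks.zip mask).foldl (fun r p => applyBlockA r p.1 p.2) bgA

-- mask[-1:] + mask[:-1]
def rotA (mask : List Char) : List Char :=
  PySem.List.slice mask (some (-1)) none ++ PySem.List.slice mask none (some (-1))

def make_wave_loop (width : Int) (interval : Int) : List String :=
  let mask0 := (buildMaskA width interval []).flatten
  let st := (PySem.List.pyRange 0 (width + interval) 1).foldl
      (fun (st : List (List Char) × List Char) _n => (st.1 ++ [stepRowA st.2], rotA st.2))
      ([], mask0)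
  st.1.map (fun loop => String.ofList loop)

-- ===== PORT B =====
def bgB : List Char :=
  [(0:Int), 1, 17, 18].foldl (fun acc i => pySetAt acc i 'b') (List.replicate 19 'r')

def rowB (width interval : Int) (n : Int) : List Char :=
  (PySem.List.enumerate pyBlocks 0).foldl
    (fun row p =>
      let c := if PySem.Int.mod (p.1 - n) (width + interval) < width then 'b' else 'r'
      p.2.foldl (fun r bi => pySetAt r (bi - 1) c) row)
    bgB

def make_wave_loop_alt (width : Int) (interval : Int) : List String :=
  (PySem.List.pyRange 0 (width + interval) 1).map (fun n => String.ofList (rowB width interval n))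

-- ===== PRECONDITION & SPEC =====
-- On (width,interval)=(1,0) A's mask loop counts the empty 'r'*0 entries toward the 9 entries it
-- wants and stops with a 5-char mask, leaving blocks 6-9 (bulbs 11-17) red: A returns
-- ['bbbbbbbbbbrrrrrrrbb']; B colours every block by the formula and returns the intended all-blue
-- row ['bbbbbbbbbbbbbbbbbbb'] (a width-1 wave with no red gap covers every block).
def D_make_wave_loop (width : Int) (interval : Int) : Prop := width = 1 ∧ interval = 0
instance (width : Int) (interval : Int) : Decidable (D_make_wave_loop width interval) := by
  unfold D_make_wave_loop; infer_instance

def Spec_make_wave_loop (width : Int) (interval : Int) (out : List String) : Prop :=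
  ¬ D_make_wave_loop width interval → out = make_wave_loop_alt width interval
instance (width : Int) (interval : Int) (out : List String) :
    Decidable (Spec_make_wave_loop width interval out) := by
  unfold Spec_make_wave_loop; infer_instance

def pvDiffWitness_make_wave_loop : Int × Int := (1, 0)
def pvDiffWitnessOut_make_wave_loop : (List String) × (List String) :=
  (["bbbbbbbbbbrrrrrrrbb"], ["bbbbbbbbbbbbbbbbbbb"])

-- ===== CLAIM (what is proved, stated in full; the proofs are below) =====
def Claim_unchanged_make_wave_loop : Prop := ∀ (width : Int) (interval : Int), Dom_make_wave_loop width interval → Spec_make_wave_loop width interval (make_wave_loop width interval)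
def Claim_changed_make_wave_loop : Prop := Dom_make_wave_loop (pvDiffWitness_make_wave_loop.1) (pvDiffWitness_make_wave_loop.2) ∧ D_make_wave_loop (pvDiffWitness_make_wave_loop.1) (pvDiffWitness_make_wave_loop.2) ∧ make_wave_loop (pvDiffWitness_make_wave_loop.1) (pvDiffWitness_make_wave_loop.2) = pvDiffWitnessOut_make_wave_loop.1 ∧ make_wave_loop_alt (pvDiffWitness_make_wave_loop.1) (pvDiffWitness_make_wave_loop.2) = pvDiffWitnessOut_make_wave_loop.2 ∧ pvDiffWitnessOut_make_wave_loop.1 ≠ pvDiffWitnessOut_make_wave_loop.2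
def Claim_exact_make_wave_loop : Prop := ∀ (width : Int) (interval : Int), Dom_make_wave_loop width interval → D_make_wave_loop width interval → make_wave_loop width interval ≠ make_wave_loop_alt width interval

-- ===== LEMMAS AND PROOFS =====
lemma buildMaskA_nil (w iv : Int) :
    buildMaskA w iv [] =
      [List.replicate w.toNat 'b', List.replicate iv.toNat 'r',
       List.replicate w.toNat 'b', List.replicate iv.toNat 'r',
       List.replicate w.toNat 'b', List.replicate iv.toNat 'r',
       List.replicate w.toNat 'b', List.replicate iv.toNat 'r',
       List.replicate w.toNat 'b', List.replicate iv.toNat 'r'] := by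
  rw [buildMaskA]; norm_num
  rw [buildMaskA]; norm_num
  rw [buildMaskA]; norm_num
  rw [buildMaskA]; norm_num
  rw [buildMaskA]; norm_num
  rw [buildMaskA]; norm_num

def fM (bw q k i : Nat) : Char := if ((i:Int) - (k:Int)) % (q:Int) < (bw:Int) then 'b' else 'r'
def M (bw q k : Nat) : List Char := (List.range (5*q)).map (fM bw q k)

lemma range_map_fM_zero (bw ri : Nat) :
    (List.range (bw+ri)).map (fM bw (bw+ri) 0) = List.replicate bw 'b' ++ List.replicate ri 'r' := by
  apply List.ext_getElem
  · simp
  · intro i h1 h2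
    have hi : i < bw + ri := by simpa using h1
    simp only [fM, List.getElem_map, List.getElem_range]
    rw [show ((i:Int) - ((0:Nat):Int)) = (i:Int) by simp]
    rw [Int.emod_eq_of_lt (by omega) (by exact_mod_cast hi)]
    rcases lt_or_ge i bw with h | h
    · rw [if_pos (by exact_mod_cast h), List.getElem_append_left (by simpa using h),
        List.getElem_replicate]
    · rw [if_neg (by omega), List.getElem_append_right (by simpa using h),
        List.getElem_replicate]

lemma M_zero_rep (bw ri : Nat) : ∀ m : Nat,
    (List.range (m*(bw+ri))).map (fM bw (bw+ri) 0)
      = (List.replicate m (List.replicate bw 'b' ++ List.replicate ri 'r')).flatten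
  | 0 => by simp
  | (m+1) => by
    rw [show (m+1)*(bw+ri) = m*(bw+ri) + (bw+ri) by ring, List.range_add, List.map_append,
      M_zero_rep bw ri m, List.replicate_succ', List.flatten_append]
    congr 1
    · rw [List.map_map]
      have : (fM bw (bw+ri) 0 ∘ fun x => m*(bw+ri) + x) = fM bw (bw+ri) 0 := by
        funext x
        simp only [Function.comp, fM]
        congr 1
        rw [show ((m*(bw+ri)+x : Nat):Int) - ((0:Nat):Int) = ((x:Int) - ((0:Nat):Int)) + ((bw+ri:Nat):Int) * m by push_cast; ring]
        rw [Int.add_mul_emod_self_left]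
      rw [this, range_map_fM_zero]
      simp
    
lemma mask0_eq (w iv : Int) :
    (buildMaskA w iv []).flatten = M w.toNat (w.toNat + iv.toNat) 0 := by
  rw [buildMaskA_nil, M, M_zero_rep w.toNat iv.toNat 5]
  simp [List.flatten, List.replicate, List.append_assoc]

lemma rotA_M (bw q k : Nat) (hq : 1 ≤ q) : rotA (M bw q k) = M bw q (k+1) := by
  rw [rotA, PySem.List.slice_from_neg_one, PySem.List.slice_to_neg_one]
  have hlen : (M bw q k).length = 5*q := by simp [M]
  have hdrop : (M bw q k).drop ((M bw q k).length - 1) = [fM bw q k (5*q-1)] := by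
    rw [hlen, M, show 5*q = (5*q-1)+1 by omega, List.range_succ, List.map_append]
    rw [show (5*q-1)+1-1 = ((List.range (5*q-1)).map (fM bw q k)).length by simp]
    rw [List.drop_left]
    simp
  have hdl : (M bw q k).dropLast = (List.range (5*q-1)).map (fM bw q k) := by
    rw [List.dropLast_eq_take, hlen, M, ← List.map_take, List.take_range]
    congr 1
    simp
  have hR : M bw q (k+1) = fM bw q (k+1) 0 :: (List.range (5*q-1)).map (fM bw q (k+1) ∘ Nat.succ) := by
    conv_lhs => rw [M, show 5*q = (5*q-1)+1 by omega, List.range_succ_eq_map, List.map_cons,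
      List.map_map]
  rw [hdrop, hdl, hR, List.singleton_append]
  congr 1
  · simp only [fM]
    congr 1
    have hc : ((5*q-1 : Nat):Int) - (k:Int) = ((0:Nat):Int) - ((k+1:Nat):Int) + (q:Int)*5 := by
      push_cast [Nat.cast_sub (show 1 ≤ 5*q by omega)]
      ring
    rw [hc, Int.add_mul_emod_self_left]
  · apply List.map_congr_left
    intro x _
    simp only [Function.comp, fM]
    congr 2
    push_cast
    ring

lemma foldA_M (bw q : Nat) (hq : 1 ≤ q) : ∀ (ns : List Int) (acc : List (List Char)) (k : Nat),
    (ns.foldl (fun (st : List (List Char) × List Char) _n =>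
        (st.1 ++ [stepRowA st.2], rotA st.2)) (acc, M bw q k)).1
      = acc ++ (List.range ns.length).map (fun j => stepRowA (M bw q (k+j)))
  | [], acc, k => by simp
  | n :: ns, acc, k => by
    simp only [List.foldl_cons, rotA_M bw q k hq]
    rw [foldA_M bw q hq ns (acc ++ [stepRowA (M bw q k)]) (k+1)]
    rw [List.append_assoc, List.singleton_append]
    rw [List.length_cons, List.range_succ_eq_map, List.map_cons, List.map_map]
    congr 2
    apply List.map_congr_left
    intro x _
    simp only [Function.comp, Nat.succ_eq_add_one]
    rw [show k+1+x = k+(x+1) by omega]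

lemma charEq (width interval : Int) (hp : 0 < width + interval) (x : Int) :
    (if x % ((width.toNat + interval.toNat : Nat):Int) < ((width.toNat : Nat):Int) then 'b' else 'r')
      = (if PySem.Int.mod x (width + interval) < width then 'b' else 'r') := by
  rw [PySem.Int.mod_eq_emod_of_pos hp]
  have hq0 : (0:Int) < ((width.toNat + interval.toNat : Nat):Int) := by push_cast; omega
  have h1 := Int.emod_nonneg x (by omega : ((width.toNat + interval.toNat : Nat):Int) ≠ 0)
  have h2 := Int.emod_lt_of_pos x hq0
  have h3 := Int.emod_nonneg x (by omega : width + interval ≠ 0)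
  have h4 := Int.emod_lt_of_pos x hp
  by_cases hw : 1 ≤ width
  · by_cases hi : 1 ≤ interval
    · rw [show ((width.toNat + interval.toNat : Nat):Int) = width + interval by push_cast; omega,
        show ((width.toNat : Nat):Int) = width by omega]
    · rw [if_pos (by push_cast at h2 ⊢; omega), if_pos (by omega)]
  · rw [if_neg (by push_cast at h1 ⊢; omega), if_neg (by omega)]

lemma M_cons (bw q k : Nat) (hq : 2 ≤ q) :
    M bw q k = fM bw q k 0 :: fM bw q k 1 :: fM bw q k 2 :: fM bw q k 3 :: fM bw q k 4 ::
      fM bw q k 5 :: fM bw q k 6 :: fM bw q k 7 :: fM bw q k 8 ::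
      (List.range (5*q-9)).map (fun i => fM bw q k (9+i)) := by
  conv_lhs => rw [M, show 5*q = 9 + (5*q-9) by omega, List.range_add,
    show List.range 9 = [0,1,2,3,4,5,6,7,8] from rfl, List.map_append, List.map_map]
  simp [Function.comp]

lemma enum_blocks :
    PySem.List.enumerate pyBlocks 0
      = [((0:Int),[(3:Int)]),(1,[4,10]),(2,[5,9]),(3,[6,8]),(4,[7]),(5,[11,17]),(6,[12,16]),
         (7,[13,15]),(8,[14])] := by decide

lemma bg_eq : bgA = bgB := by decide

lemma stepRow_eq (width interval : Int) (hp : 0 < width + interval)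
    (hq : 2 ≤ width.toNat + interval.toNat) (k : Nat) :
    stepRowA (M width.toNat (width.toNat + interval.toNat) k) = rowB width interval (k:Int) := by
  have hfm : ∀ i : Nat, fM width.toNat (width.toNat + interval.toNat) k i
      = (if PySem.Int.mod ((i:Int) - (k:Int)) (width + interval) < width then 'b' else 'r') := by
    intro i
    rw [fM, charEq width interval hp]
  rw [stepRowA, M_cons _ _ _ hq, rowB, enum_blocks, bg_eq]
  simp only [pyBlocks, List.zip_cons_cons, List.zip_nil_left, List.foldl_cons, List.foldl_nil,
    applyBlockA, hfm]
  norm_num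

lemma main_eq (w iv : Int) (hp : 0 < w + iv) (hq : 2 ≤ w.toNat + iv.toNat) :
    make_wave_loop w iv = make_wave_loop_alt w iv := by
  have hq1 : 1 ≤ w.toNat + iv.toNat := by omega
  simp only [make_wave_loop, make_wave_loop_alt]
  rw [mask0_eq, foldA_M _ _ hq1 _ [] 0, PySem.List.pyRange_one]
  simp only [List.length_map, List.length_range, List.nil_append, List.map_map]
  apply List.map_congr_left
  intro j hj
  simp only [Function.comp]
  rw [Nat.zero_add, zero_add]
  exact congrArg _ (stepRow_eq w iv hp hq j)

-- ===== VERDICT (by name: the statement is the Claim_ definition above) =====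
theorem make_wave_loop_spec : Claim_unchanged_make_wave_loop := by
  intro w iv _
  unfold Spec_make_wave_loop
  intro hnd
  unfold D_make_wave_loop at hnd
  by_cases hp : 0 < w + iv
  · by_cases h01 : w = 0 ∧ iv = 1
    · obtain ⟨h1, h2⟩ := h01
      subst h1; subst h2
      rw [make_wave_loop, buildMaskA_nil]
      decide
    · exact main_eq w iv hp (by omega)
  · simp only [make_wave_loop, make_wave_loop_alt,
      PySem.List.pyRange_one_eq_nil (by omega : w + iv ≤ 0)]
    simp

theorem make_wave_loop_changed : Claim_changed_make_wave_loop := by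
  unfold Claim_changed_make_wave_loop
  refine ⟨by decide, by decide, ?_, by decide, by decide⟩
  show make_wave_loop 1 0 = ["bbbbbbbbbbrrrrrrrbb"]
  rw [make_wave_loop, buildMaskA_nil]
  decide

theorem make_wave_loop_tight : Claim_exact_make_wave_loop := by
  intro w iv _ hd
  obtain ⟨h1, h2⟩ := hd
  subst h1; subst h2
  rw [make_wave_loop, buildMaskA_nil]
  decide
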